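-- pv_equiv track=rewrite | github.com/alvin-the-programmer/alexstuff | fight_club/6_16_21.py | replace_tokens
-- ===== SOURCE A (Python) =====
-- def replace_tokens(path, tokens):
--     position = 0
--     new_paths = []
--     while position < len(path):
--         curr = path[position]
--
--         if curr == '%':
--             closer_idx = path.index('%', position + 1)
--             new_paths.append(tokens[path[position + 1: closer_idx]])
--             position = closer_idx
--         else:
--             new_paths.append(curr)
--
--         position += 1
--
--     return ''.join(new_paths)
--
-- path = '%USER%/%ROOT%/desktop/%DATE%/%A%/%B%/%C%.txt'
--
-- tokens = {
--     'USER': 'azablan->%ROLE%',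
--     'DATE': '06-15-2021',
--     'ROLE': 'dev',
--     'ROOT': 'main/tmp',
--     'A': 'one%B%%C%',
--     'B': 'two',
--     'C': 'three%D%',
--     'D': 'LOL'
-- }
-- ===== SOURCE B (Python) =====
-- def replace_tokens(path, tokens):
--     parts = path.split('%')
--     return ''.join(p if i % 2 == 0 else tokens[p] for i, p in enumerate(parts))
-- ===== Notes on version B (the rewrite author's own statement) =====
-- stated objective: faster
-- what changed: Instead of a char-by-char index scan that searches for each closing '%' with path.index and appends one piece per character, B splits the path on '%' once and joins the segments back, substituting tokens[p] at odd split positions.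
import Mathlib
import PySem

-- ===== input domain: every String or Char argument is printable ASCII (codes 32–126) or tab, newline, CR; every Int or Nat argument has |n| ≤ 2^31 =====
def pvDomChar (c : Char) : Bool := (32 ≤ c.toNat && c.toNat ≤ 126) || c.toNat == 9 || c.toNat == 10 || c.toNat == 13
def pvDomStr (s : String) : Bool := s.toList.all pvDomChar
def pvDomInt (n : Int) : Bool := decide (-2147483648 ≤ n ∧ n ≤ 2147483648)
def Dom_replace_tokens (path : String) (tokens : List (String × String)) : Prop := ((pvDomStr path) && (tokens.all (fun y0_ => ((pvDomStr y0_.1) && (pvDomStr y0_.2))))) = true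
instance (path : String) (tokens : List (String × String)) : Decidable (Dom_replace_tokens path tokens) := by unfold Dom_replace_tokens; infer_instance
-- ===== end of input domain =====

-- ===== PORT A =====
-- B changes the algorithm: A scans char by char searching each closing '%' with path.index;
-- B splits on '%' once and substitutes tokens at odd split positions. Equivalence on Pre_ (A returns there).

-- A-side helper: path.index('%', position + 1) combined with the slice path[position+1:closer_idx]:
-- returns (the token name before the next '%', the rest after it); none exactly where Python's
-- str.index raises ValueError (no further '%').
def pvEndScan : List Char → Option (List Char × List Char)
  | [] => none
  | c :: t => if c = '%' then some ([], t)
              else (pvEndScan t).map (fun p => (c :: p.1, p.2))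

theorem pvEndScan_length : ∀ {l : List Char} {n r : List Char}, pvEndScan l = some (n, r) → r.length < l.length := by
  intro l
  induction l with
  | nil => intro n r h; simp [pvEndScan] at h
  | cons c t ih =>
    intro n r h
    simp only [pvEndScan] at h
    split at h
    · simp only [Option.some.injEq, Prod.mk.injEq] at h
      obtain ⟨hn, hr⟩ := h
      subst hr
      simp only [List.length_cons]
      omega
    · simp only [Option.map_eq_some_iff] at h
      obtain ⟨p, hp, hpe⟩ := h
      have := ih (n := p.1) (r := p.2) (by rw [hp])
      cases hpe
      simpa using Nat.lt_succ_of_lt this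

-- the while loop of A: walks the path, emitting one-char pieces and token values (new_paths)
def pvALoop (tok : PySem.Dict String String) : List Char → List (List Char) → List (List Char)
  | [], acc => acc
  | c :: rest, acc =>
    if c = '%' then
      match h : pvEndScan rest with
      | none => acc            -- path.index raises ValueError here; Pre_ excludes this
      | some (name, rest') =>
        match tok.get? (String.mk name) with
        | none => acc          -- tokens[...] raises KeyError here; Pre_ excludes this
        | some v => pvALoop tok rest' (acc ++ [v.toList])
    else pvALoop tok rest (acc ++ [[c]])
  termination_by l _ => l.length
  decreasing_by
  · exact Nat.lt_succ_of_lt (pvEndScan_length h)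
  · simp

def replace_tokens (path : String) (tokens : List (String × String)) : String :=
  String.mk (PySem.Chars.join [] (pvALoop (PySem.Dict.mk tokens) path.toList []))

-- ===== PORT B =====
-- the generator's element: p if i % 2 == 0 else tokens[p]  (KeyError outside Pre_: getD "")
def pvSub (tok : PySem.Dict String String) (pi : List Char × Nat) : List Char :=
  if pi.2 % 2 = 0 then pi.1 else ((tok.get? (String.mk pi.1)).getD "").toList

def replace_tokens_alt (path : String) (tokens : List (String × String)) : String :=
  let parts := PySem.Chars.splitOn path.toList "%".toList
  String.mk (PySem.Chars.join [] ((List.zipIdx parts).map (pvSub (PySem.Dict.mk tokens))))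

-- ===== PRECONDITION & SPEC =====
-- shape check on the split: an odd number of segments (every '%' is matched) and every
-- odd-position segment is a key of tokens
def pvOkParts (tok : PySem.Dict String String) : List (List Char) → Bool
  | [] => false
  | [_] => true
  | _ :: t :: rest => (tok.get? (String.mk t)).isSome && pvOkParts tok rest

-- Pre_ excludes exactly the inputs where A raises: an unmatched '%' (str.index raises ValueError)
-- or a token name missing from tokens (KeyError).
def Pre_replace_tokens (path : String) (tokens : List (String × String)) : Prop :=
  pvOkParts (PySem.Dict.mk tokens) (PySem.Chars.splitOn path.toList "%".toList) = true

instance (path : String) (tokens : List (String × String)) : Decidable (Pre_replace_tokens path tokens) := by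
  unfold Pre_replace_tokens; infer_instance

def pvWitness_replace_tokens : String × (List (String × String)) :=
  ("%USER%/home/%DATE%.txt", [("USER", "bob"), ("DATE", "06-15")])

def Spec_replace_tokens (path : String) (tokens : List (String × String)) (out : String) : Prop := out = replace_tokens_alt path tokens
instance (path : String) (tokens : List (String × String)) (out : String) : Decidable (Spec_replace_tokens path tokens out) := by unfold Spec_replace_tokens; infer_instance

-- ===== CLAIM (what is proved, stated in full; the proofs are below) =====
def Claim_equal_replace_tokens : Prop := ∀ (path : String) (tokens : List (String × String)), Dom_replace_tokens path tokens → Pre_replace_tokens path tokens → Spec_replace_tokens path tokens (replace_tokens path tokens)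

-- ===== LEMMAS AND PROOFS =====

-- structural model of path.split('%')
def pvSplit : List Char → List (List Char)
  | [] => [[]]
  | c :: t => if c = '%' then [] :: pvSplit t else (pvSplit t).modifyHead (c :: ·)

theorem pvSplit_ne_nil (l : List Char) : pvSplit l ≠ [] := by
  cases l with
  | nil => simp [pvSplit]
  | cons c t =>
    simp only [pvSplit]
    split
    · simp
    · cases h : pvSplit t with
      | nil => exact absurd h (pvSplit_ne_nil t)
      | cons s ss => simp

theorem pvSplitOn_go (fuel : Nat) : ∀ (l cur : List Char) (acc : List (List Char)), l.length < fuel →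
    PySem.Chars.splitOn.go ['%'] fuel l cur acc =
      acc.reverse ++ (cur.reverse ++ (pvSplit l).headI) :: (pvSplit l).tail := by
  induction fuel with
  | zero => intro l cur acc h; omega
  | succ fuel ih =>
    intro l cur acc h
    cases l with
    | nil => simp [PySem.Chars.splitOn.go, pvSplit]
    | cons c rest =>
      rw [PySem.Chars.splitOn.go]
      by_cases hc : c = '%'
      · subst hc
        have hpre : List.isPrefixOf ['%'] ('%' :: rest) = true := by simp [List.isPrefixOf]
        rw [if_pos hpre]
        have hdrop : List.drop ['%'].length ('%' :: rest) = rest := rfl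
        rw [hdrop]
        simp only [List.length_cons] at h
        rw [ih rest [] (List.reverse cur :: acc) (by omega)]
        cases hs : pvSplit rest with
        | nil => exact absurd hs (pvSplit_ne_nil rest)
        | cons s ss => simp [pvSplit, hs]
      · have hpre : List.isPrefixOf ['%'] (c :: rest) = false := by
          simp [List.isPrefixOf]; exact fun h => absurd h.symm hc
        rw [if_neg (by simp [hpre])]
        simp only [List.length_cons] at h
        rw [ih rest (c :: cur) acc (by omega)]
        cases hs : pvSplit rest with
        | nil => exact absurd hs (pvSplit_ne_nil rest)
        | cons s ss => simp [pvSplit, hc, hs]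

theorem pvSplitOn_eq (l : List Char) : PySem.Chars.splitOn l ['%'] = pvSplit l := by
  rw [PySem.Chars.splitOn, pvSplitOn_go (l.length + 1) l [] [] (by omega)]
  cases hs : pvSplit l with
  | nil => exact absurd hs (pvSplit_ne_nil l)
  | cons s ss => simp

theorem pvEndScan_none {l : List Char} (h : pvEndScan l = none) : pvSplit l = [l] := by
  induction l with
  | nil => simp [pvSplit]
  | cons c t ih =>
    simp only [pvEndScan] at h
    split at h
    · simp at h
    · simp only [Option.map_eq_none_iff] at h
      rename_i hc
      simp [pvSplit, hc, ih h]

theorem pvEndScan_some : ∀ {l n r : List Char}, pvEndScan l = some (n, r) → pvSplit l = n :: pvSplit r := by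
  intro l
  induction l with
  | nil => intro n r h; simp [pvEndScan] at h
  | cons c t ih =>
    intro n r h
    simp only [pvEndScan] at h
    split at h
    · rename_i hc
      simp at h
      obtain ⟨hn, hr⟩ := h
      subst hn; subst hr
      simp [pvSplit, hc]
    · rename_i hc
      simp only [Option.map_eq_some_iff] at h
      obtain ⟨p, hp, hpe⟩ := h
      cases p with
      | mk n0 r' =>
        cases hpe
        have := ih hp
        cases hs : pvSplit r' with
        | nil => exact absurd hs (pvSplit_ne_nil r')
        | cons s ss =>
          rw [hs] at this
          simp [pvSplit, hc, this]

-- B-style rendering of the split: literal, value, literal, value, …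
def pvRender (tok : PySem.Dict String String) : List (List Char) → List (List Char)
  | [] => []
  | [s] => [s]
  | s :: t :: rest => s :: ((tok.get? (String.mk t)).getD "").toList :: pvRender tok rest

theorem pvOkParts_modifyHead (tok : PySem.Dict String String) (f : List Char → List Char) :
    ∀ ps : List (List Char), pvOkParts tok (ps.modifyHead f) = pvOkParts tok ps := by
  intro ps
  match ps with
  | [] => rfl
  | [s] => rfl
  | s :: t :: rest => rfl

theorem pvRender_modifyHead_flatten (tok : PySem.Dict String String) (c : Char) :
    ∀ (s : List Char) (tl : List (List Char)),
      (pvRender tok ((s :: tl).modifyHead (c :: ·))).flatten = c :: (pvRender tok (s :: tl)).flatten := by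
  intro s tl
  match tl with
  | [] => simp [pvRender]
  | t :: rest => simp [pvRender]

theorem pvALoop_render (tok : PySem.Dict String String) :
    ∀ (l : List Char) (acc : List (List Char)), pvOkParts tok (pvSplit l) = true →
      (pvALoop tok l acc).flatten = acc.flatten ++ (pvRender tok (pvSplit l)).flatten := by
  intro l
  induction hn : l.length using Nat.strong_induction_on generalizing l with
  | _ n ih =>
    intro acc hok
    cases l with
    | nil => simp [pvALoop, pvSplit, pvRender]
    | cons c rest =>
      by_cases hc : c = '%'
      · subst hc
        rw [pvALoop, if_pos rfl]
        split
        · rename_i he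
          exfalso
          have := pvEndScan_none he
          simp [pvSplit, this, pvOkParts] at hok
        · rename_i name rest' he
          have hsp := pvEndScan_some he
          have hsplit : pvSplit ('%' :: rest) = [] :: name :: pvSplit rest' := by
            simp [pvSplit, hsp]
          rw [hsplit] at hok
          simp only [pvOkParts, Bool.and_eq_true, Option.isSome_iff_exists] at hok
          obtain ⟨⟨v, hv⟩, hok'⟩ := hok
          rw [hv]
          have hlen := pvEndScan_length he
          rw [ih rest'.length (by subst hn; simp only [List.length_cons]; omega) rest' rfl (acc ++ [v.toList]) hok']
          rw [hsplit]
          simp [pvRender, hv]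
      · rw [pvALoop, if_neg hc]
        have hsplit : pvSplit (c :: rest) = (pvSplit rest).modifyHead (c :: ·) := by
          simp [pvSplit, hc]
        rw [hsplit, pvOkParts_modifyHead] at hok
        rw [ih rest.length (by subst hn; simp) rest rfl (acc ++ [[c]]) hok]
        rw [hsplit]
        cases hs : pvSplit rest with
        | nil => exact absurd hs (pvSplit_ne_nil rest)
        | cons s tl => rw [pvRender_modifyHead_flatten]; simp

theorem pvB_render (tok : PySem.Dict String String) :
    ∀ (ps : List (List Char)) (n : Nat), n % 2 = 0 →
      ((List.zipIdx ps n).map (pvSub tok)).flatten = (pvRender tok ps).flatten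
  | [], n, _ => by simp [pvRender]
  | [s], n, h => by simp [pvRender, pvSub, h]
  | s :: t :: rest, n, h => by
    have h1 : (n + 1) % 2 = 1 := by omega
    have h2 : (n + 2) % 2 = 0 := by omega
    simp only [List.zipIdx, List.map, List.flatten, pvRender, pvSub, h, h1]
    rw [pvB_render tok rest (n + 2) h2]
    simp

theorem pvJoin_nil (ps : List (List Char)) : PySem.Chars.join [] ps = ps.flatten := by
  induction ps with
  | nil => simp [PySem.Chars.join, List.intercalate]
  | cons s ss ih =>
    cases ss with
    | nil => simp [PySem.Chars.join, List.intercalate]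
    | cons t ts =>
      simp only [PySem.Chars.join, List.intercalate] at ih ⊢
      simp [List.intersperse] at ih ⊢
      exact ih

theorem pvPct : "%".toList = ['%'] := rfl

-- ===== VERDICT (by name: the statement is the Claim_ definition above) =====
theorem replace_tokens_spec : Claim_equal_replace_tokens := by
  intro path tokens _ hpre
  unfold Spec_replace_tokens replace_tokens replace_tokens_alt
  unfold Pre_replace_tokens at hpre
  rw [pvPct, pvSplitOn_eq] at hpre
  simp only [pvPct, pvSplitOn_eq, pvJoin_nil]
  congr 1
  rw [pvALoop_render _ _ [] hpre, pvB_render _ _ 0 rfl]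
  simp
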